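-- pv_equiv track=rewrite | github.com/GoldRush343/University-Studing | Term 1/Python/LabaPoDM/buleviOtnoshenia/TheoremOfThePost.py | isTl
-- ===== SOURCE A (Python) =====
-- def isTl(ti, argSize):
--     n = len(ti)
--     pzh = ti[:]
--     for i in range(argSize):
--         for vec in range(n):
--             if (vec & (1 << i)):
--                 pzh[vec] ^= pzh[vec ^ (1 << i)]
--     for vec in range(n):
--         if bin(vec).count('1') >= 2 and pzh[vec] == 1:
--             return False
--     return True
-- ===== SOURCE B (Python) =====
-- def isTl(ti, argSize):
--     # Per-vector Zhegalkin coefficient: no transform array; for each vec with >=2 set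
--     # bits, expand the XOR support by toggling each of the first argSize bits of vec.
--     k = max(argSize, 0)
--     for vec in range(len(ti)):
--         if bin(vec).count('1') < 2:
--             continue
--         idxs = [vec]
--         for j in range(k):
--             if vec & (1 << j):
--                 idxs += [i ^ (1 << j) for i in idxs]
--         acc = 0
--         for i in idxs:
--             acc ^= ti[i]
--         if acc == 1:
--             return False
--     return True
-- ===== Notes on version B (the rewrite author's own statement) =====
-- stated objective: alternative
-- what changed: A builds the full Zhegalkin spectrum with an in-place butterfly transform over the whole table before scanning; B keeps no transform array and computes, per vector with >=2 set bits, only that vector's coefficient by expanding its XOR support (toggling its low argSize bits).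
import Mathlib
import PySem

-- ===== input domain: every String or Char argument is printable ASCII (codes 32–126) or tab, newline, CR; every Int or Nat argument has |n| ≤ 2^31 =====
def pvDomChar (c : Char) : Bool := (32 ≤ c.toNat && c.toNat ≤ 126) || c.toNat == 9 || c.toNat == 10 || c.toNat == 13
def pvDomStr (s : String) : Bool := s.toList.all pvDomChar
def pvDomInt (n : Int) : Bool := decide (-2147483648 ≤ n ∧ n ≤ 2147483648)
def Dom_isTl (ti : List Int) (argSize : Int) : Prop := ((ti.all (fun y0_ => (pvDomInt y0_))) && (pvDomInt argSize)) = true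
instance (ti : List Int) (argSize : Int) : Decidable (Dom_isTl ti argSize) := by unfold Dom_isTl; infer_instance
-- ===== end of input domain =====

-- B drops A's in-place butterfly transform array and instead computes each needed Zhegalkin
-- coefficient per vector by expanding its XOR support (alternative decomposition; no speed claim).

-- ===== PORT A =====
-- one round of A's in-place butterfly: 'for vec in range(n): if vec & (1 << i): pzh[vec] ^= pzh[vec ^ (1 << i)]'
-- (indices: vec < n and vec ^ (1 << i) < vec < n, so pzh[·] never raises; getD is exact here)
def pvRound (n i : Nat) (pzh : List Int) : List Int :=
  (List.range n).foldl (fun pzh vec =>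
    if (vec &&& (1 <<< i)) != 0 then
      pzh.set vec (PySem.Int.bxor (pzh.getD vec 0) (pzh.getD (vec ^^^ (1 <<< i)) 0))
    else pzh) pzh

-- 'for i in range(argSize)' = List.range argSize.toNat (empty for argSize ≤ 0, exactly like Python);
-- bin(vec).count('1') = PySem.Int.bitCount for vec ≥ 0; the early-return scan is List.all of the negated condition.
def isTl (ti : List Int) (argSize : Int) : Bool :=
  let n := ti.length
  let pzh := (List.range argSize.toNat).foldl (fun pzh i => pvRound n i pzh) ti
  (List.range n).all (fun vec =>
    !(decide (2 ≤ PySem.Int.bitCount (vec : Int)) && decide (pzh.getD vec 0 = 1)))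

-- ===== PORT B =====
-- Source B's expansion loop 'idxs = [vec]; for j in range(k): if vec & (1 << j): idxs += [i ^ (1 << j) for i in idxs]'
def pvExpand (vec k : Nat) : List Nat :=
  (List.range k).foldl (fun idxs j =>
    if (vec &&& (1 <<< j)) != 0 then idxs ++ idxs.map (fun i => i ^^^ (1 <<< j)) else idxs) [vec]

-- k = max(argSize, 0); 'acc = 0; for i in idxs: acc ^= ti[i]' is a foldl (all indices stay < len(ti));
-- 'continue' for popcount < 2, and the early-return scan is again List.all.
def isTl_alt (ti : List Int) (argSize : Int) : Bool :=
  let k := (max argSize 0).toNat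
  (List.range ti.length).all (fun vec =>
    if PySem.Int.bitCount (vec : Int) < 2 then true
    else !decide (((pvExpand vec k).foldl (fun acc i => PySem.Int.bxor acc (ti.getD i 0)) 0) = 1))

-- ===== PRECONDITION & SPEC =====
def Spec_isTl (ti : List Int) (argSize : Int) (out : Bool) : Prop := out = isTl_alt ti argSize
instance (ti : List Int) (argSize : Int) (out : Bool) : Decidable (Spec_isTl ti argSize out) := by unfold Spec_isTl; infer_instance

-- ===== CLAIM (what is proved, stated in full; the proofs are below) =====
def Claim_equal_isTl : Prop := ∀ (ti : List Int) (argSize : Int), Dom_isTl ti argSize → Spec_isTl ti argSize (isTl ti argSize)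

-- ===== LEMMAS AND PROOFS =====

-- the Zhegalkin coefficient as a recursion on the number of processed bits: the common middle ground
def pvZheg (ti : List Int) : Nat → Nat → Int
  | 0, vec => ti.getD vec 0
  | (k+1), vec =>
      if vec.testBit k then PySem.Int.bxor (pvZheg ti k vec) (pvZheg ti k (vec ^^^ 2 ^ k))
      else pvZheg ti k vec

def pvX (ti : List Int) (l : List Nat) : Int := l.foldl (fun acc i => PySem.Int.bxor acc (ti.getD i 0)) 0

theorem pv_bxor_eq_xor (a b : Int) : PySem.Int.bxor a b = Int.xor a b := by
  rcases a with m | m <;> rcases b with n | n <;>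
    simp [PySem.Int.bxor, Int.xor, Int.negSucc_eq] <;> omega

theorem pv_xor_assoc (a b c : Int) : Int.xor (Int.xor a b) c = Int.xor a (Int.xor b c) := by
  rcases a with m | m <;> rcases b with n | n <;> rcases c with p | p <;>
    simp [Int.xor, Nat.xor_assoc]

theorem pv_bxor_assoc (a b c : Int) :
    PySem.Int.bxor (PySem.Int.bxor a b) c = PySem.Int.bxor a (PySem.Int.bxor b c) := by
  simp [pv_bxor_eq_xor, pv_xor_assoc]

theorem pv_zero_bxor (a : Int) : PySem.Int.bxor 0 a = a := by
  rw [PySem.Int.bxor_comm]; exact PySem.Int.bxor_zero a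

theorem pv_foldl_bxor (ti : List Int) (l : List Nat) (a : Int) :
    l.foldl (fun acc i => PySem.Int.bxor acc (ti.getD i 0)) a = PySem.Int.bxor a (pvX ti l) := by
  induction l generalizing a with
  | nil => simp [pvX, PySem.Int.bxor_zero]
  | cons x xs ih =>
      simp only [pvX, List.foldl_cons]
      rw [ih, ih (PySem.Int.bxor 0 (ti.getD x 0)), pv_zero_bxor, pv_bxor_assoc]

theorem pvX_append (ti : List Int) (l₁ l₂ : List Nat) :
    pvX ti (l₁ ++ l₂) = PySem.Int.bxor (pvX ti l₁) (pvX ti l₂) := by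
  simp only [pvX, List.foldl_append]
  exact pv_foldl_bxor ti l₂ _

theorem pv_testBit_and (v j : Nat) : ((v &&& (1 <<< j)) != 0) = v.testBit j := by
  rw [Nat.one_shiftLeft, Nat.and_two_pow]
  cases h : v.testBit j <;> simp

theorem pvExpand_succ (vec k : Nat) :
    pvExpand vec (k+1) =
      if vec.testBit k then pvExpand vec k ++ (pvExpand vec k).map (fun i => i ^^^ (1 <<< k))
      else pvExpand vec k := by
  rw [pvExpand, pvExpand, List.range_succ, List.foldl_append]
  rw [List.foldl_cons, List.foldl_nil, pv_testBit_and]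

theorem pvExpand_shift (vec j : Nat) :
    ∀ k, k ≤ j → pvExpand (vec ^^^ (1 <<< j)) k = (pvExpand vec k).map (fun i => i ^^^ (1 <<< j)) := by
  intro k
  induction k with
  | zero => intro _; simp [pvExpand]
  | succ k ih =>
      intro hk
      have hjk : decide (j = k) = false := decide_eq_false (by omega)
      have hbit : (vec ^^^ (1 <<< j)).testBit k = vec.testBit k := by
        simp [Nat.testBit_xor, Nat.one_shiftLeft, Nat.testBit_two_pow, hjk]
      rw [pvExpand_succ, pvExpand_succ, hbit, ih (by omega)]
      cases h : vec.testBit k with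
      | false => simp
      | true =>
          simp only [if_true, List.map_append, List.map_map]
          congr 1
          apply List.map_congr_left
          intro a _
          simp only [Function.comp_apply]
          rw [Nat.xor_assoc, Nat.xor_assoc, Nat.xor_comm (1 <<< j) (1 <<< k)]

theorem pvB_main (ti : List Int) : ∀ (k vec : Nat), pvX ti (pvExpand vec k) = pvZheg ti k vec := by
  intro k
  induction k with
  | zero =>
      intro vec
      simp [pvExpand, pvX, pvZheg, pv_zero_bxor]
  | succ k ih =>
      intro vec
      rw [pvExpand_succ]
      simp only [pvZheg]
      cases h : vec.testBit k with
      | false => simp [ih]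
      | true =>
          simp only [if_true]
          rw [pvX_append, ← pvExpand_shift vec k k (le_refl k), Nat.one_shiftLeft, ih, ih]

theorem pv_xor_pow_lt (m i : Nat) (h : m.testBit i = true) : m ^^^ (1 <<< i) < m := by
  apply Nat.lt_of_testBit i
  · simp [Nat.testBit_xor, Nat.one_shiftLeft, h]
  · exact h
  · intro j hj
    have hij : decide (i = j) = false := decide_eq_false (by omega)
    simp [Nat.testBit_xor, Nat.one_shiftLeft, Nat.testBit_two_pow, hij]

theorem pv_foldl_set_len (i : Nat) (vs : List Nat) :
    ∀ (l : List Int),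
      (vs.foldl (fun pzh vec =>
        if (vec &&& (1 <<< i)) != 0 then
          pzh.set vec (PySem.Int.bxor (pzh.getD vec 0) (pzh.getD (vec ^^^ (1 <<< i)) 0))
        else pzh) l).length = l.length := by
  induction vs with
  | nil => intro l; rfl
  | cons v vs ih =>
      intro l
      simp only [List.foldl_cons]
      rw [ih]
      split <;> simp

theorem pvRound_len (n i : Nat) (l : List Int) : (pvRound n i l).length = l.length :=
  pv_foldl_set_len i (List.range n) l

theorem pvRound_aux (i : Nat) (l : List Int) :
    ∀ m, m ≤ l.length → ∀ vec,
      ((List.range m).foldl (fun pzh vec =>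
        if (vec &&& (1 <<< i)) != 0 then
          pzh.set vec (PySem.Int.bxor (pzh.getD vec 0) (pzh.getD (vec ^^^ (1 <<< i)) 0))
        else pzh) l).getD vec 0 =
      if vec < m ∧ vec.testBit i then PySem.Int.bxor (l.getD vec 0) (l.getD (vec ^^^ (1 <<< i)) 0)
      else l.getD vec 0 := by
  intro m
  induction m with
  | zero => intro _ vec; simp
  | succ m ih =>
      intro hm vec
      have ihm := ih (by omega)
      rw [List.range_succ, List.foldl_append, List.foldl_cons, List.foldl_nil]
      set P := ((List.range m).foldl (fun pzh vec =>
        if (vec &&& (1 <<< i)) != 0 then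
          pzh.set vec (PySem.Int.bxor (pzh.getD vec 0) (pzh.getD (vec ^^^ (1 <<< i)) 0))
        else pzh) l) with hPdef
      have lenP : P.length = l.length := pv_foldl_set_len i (List.range m) l
      rw [pv_testBit_and]
      cases hb : m.testBit i with
      | false =>
          simp only [Bool.false_eq_true, if_false]
          rw [ihm vec]
          by_cases hv : vec = m
          · subst hv; simp [hb]
          · have hiff : (vec < m ∧ vec.testBit i = true) ↔ (vec < m + 1 ∧ vec.testBit i = true) := by
              constructor
              · rintro ⟨h1, h2⟩; exact ⟨by omega, h2⟩
              · rintro ⟨h1, h2⟩; exact ⟨by omega, h2⟩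
            rw [if_congr hiff rfl rfl]
      | true =>
          simp only [if_true]
          have hpm : (m ^^^ (1 <<< i)).testBit i = false := by
            simp [Nat.testBit_xor, Nat.one_shiftLeft, hb]
          by_cases hv : vec = m
          · subst hv
            rw [List.getD_eq_getElem?_getD, List.getElem?_set_self (by omega)]
            simp only [Option.getD_some]
            rw [ihm vec, ihm (vec ^^^ (1 <<< i))]
            simp [hpm, hb]
          · rw [List.getD_eq_getElem?_getD, List.getElem?_set_ne (fun h => hv h.symm),
                ← List.getD_eq_getElem?_getD, ihm vec]
            have hiff : (vec < m ∧ vec.testBit i = true) ↔ (vec < m + 1 ∧ vec.testBit i = true) := by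
              constructor
              · rintro ⟨h1, h2⟩; exact ⟨by omega, h2⟩
              · rintro ⟨h1, h2⟩; exact ⟨by omega, h2⟩
            rw [if_congr hiff rfl rfl]

theorem pvT_len (ti : List Int) (K : Nat) :
    ((List.range K).foldl (fun pzh i => pvRound ti.length i pzh) ti).length = ti.length := by
  induction K with
  | zero => rfl
  | succ K ih => rw [List.range_succ, List.foldl_append, List.foldl_cons, List.foldl_nil, pvRound_len, ih]

theorem pvA_main (ti : List Int) : ∀ (K vec : Nat), vec < ti.length →
    ((List.range K).foldl (fun pzh i => pvRound ti.length i pzh) ti).getD vec 0 = pvZheg ti K vec := by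
  intro K
  induction K with
  | zero => intro vec _; simp [pvZheg]
  | succ K ih =>
      intro vec hv
      rw [List.range_succ, List.foldl_append, List.foldl_cons, List.foldl_nil]
      rw [pvRound]
      have hlen : ti.length ≤ ((List.range K).foldl (fun pzh i => pvRound ti.length i pzh) ti).length := by
        rw [pvT_len]
      rw [pvRound_aux K _ ti.length hlen vec]
      simp only [pvZheg]
      cases hb : vec.testBit K with
      | false =>
          rw [if_neg (by simp : ¬(vec < ti.length ∧ false = true)), if_neg (by simp : ¬ false = true)]
          exact ih vec hv
      | true =>
          have hp : vec ^^^ (1 <<< K) < vec := pv_xor_pow_lt vec K hb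
          rw [if_pos ⟨hv, rfl⟩, if_pos rfl, Nat.one_shiftLeft, ih vec hv, ih (vec ^^^ 2 ^ K) (by rw [← Nat.one_shiftLeft]; omega)]

theorem pv_all_congr_mem {l : List Nat} {p q : Nat → Bool} (h : ∀ x ∈ l, p x = q x) :
    l.all p = l.all q := by
  induction l with
  | nil => rfl
  | cons x xs ih =>
      simp only [List.all_cons]
      rw [h x (by simp), ih (fun y hy => h y (by simp [hy]))]

-- ===== VERDICT (by name: the statement is the Claim_ definition above) =====
theorem isTl_spec : Claim_equal_isTl := by
  intro ti argSize _
  unfold Spec_isTl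
  have hk : (max argSize 0).toNat = argSize.toNat := by omega
  simp only [isTl, isTl_alt, hk]
  apply pv_all_congr_mem
  intro vec hvec
  have hv : vec < ti.length := List.mem_range.mp hvec
  rw [pvA_main ti argSize.toNat vec hv, ← pvB_main ti argSize.toNat vec]
  by_cases hp : PySem.Int.bitCount (vec : Int) < 2
  · simp [hp]
  · simp only [if_neg hp, (by omega : 2 ≤ PySem.Int.bitCount (vec : Int)), decide_true, Bool.true_and]
    simp [pvX]
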